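-- pv_equiv track=rewrite | github.com/alunix/sapl | sapl/legacy/migracao_dados.py | get_reapontamento_de_autores_repetidos
-- ===== SOURCE A (Python) =====
-- from itertools import groupby
--
-- def get_reapontamento_de_autores_repetidos(autores):
--     """ Dada uma lista ordenada de pares (cod_zzz, cod_autor) retorna:
--
--     * a lista de grupos de cod_autor'es repetidos
--       (quando há mais de um cod_autor para um mesmo cod_zzz)
--
--     * a lista de cod_autor'es a serem apagados (todos além do 1o de cada grupo)
--     """
--     grupos_de_repetidos = [
--         [cod_autor for _, cod_autor in grupo]
--         for cod_zzz, grupo in groupby(autores, lambda r: r[0])]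
--     # mantém apenas os grupos com mais de um autor por cod_zzz
--     grupos_de_repetidos = [g for g in grupos_de_repetidos if len(g) > 1]
--     # aponta cada autor de cada grupo de repetidos para o 1o do seu grupo
--     reapontamento = {autor: grupo[0]
--                      for grupo in grupos_de_repetidos
--                      for autor in grupo}
--     # apagaremos todos menos o primeiro
--     apagar = [k for k, v in reapontamento.items() if k != v]
--     return reapontamento, apagar
-- ===== SOURCE B (Python) =====
-- def get_reapontamento_de_autores_repetidos(autores):
--     """Neighbor-flag formulation: no grouping at all. For each position compute
--     whether its key equals the previous/next key (adjacent-pair comparisons),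
--     carry the current run-leader in a scan, and insert into the dict exactly the
--     positions that have an equal-keyed neighbor."""
--     pares = list(zip(autores, autores[1:]))
--     same_prev = ([False] + [p[0] == q[0] for p, q in pares]) if autores else []
--     same_next = ([p[0] == q[0] for p, q in pares] + [False]) if autores else []
--     firsts = []
--     prev = None
--     for (_, autor), sp in zip(autores, same_prev):
--         if not sp:
--             prev = autor
--         firsts.append(prev)
--     reapontamento = {}
--     for ((_, autor), first), (sp, sn) in zip(zip(autores, firsts), zip(same_prev, same_next)):
--         if sp or sn:
--             reapontamento[autor] = first
--     apagar = [k for k, v in reapontamento.items() if k != v]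
--     return reapontamento, apagar
-- ===== Notes on version B (the rewrite author's own statement) =====
-- stated objective: alternative
-- what changed: Replaces groupby grouping + length filter + dict comprehension by a group-free neighbor-flag formulation: adjacent-pair key comparisons mark positions with an equal-keyed neighbor, a scan carries the run-leader, and exactly the marked positions are inserted.
import Mathlib
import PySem

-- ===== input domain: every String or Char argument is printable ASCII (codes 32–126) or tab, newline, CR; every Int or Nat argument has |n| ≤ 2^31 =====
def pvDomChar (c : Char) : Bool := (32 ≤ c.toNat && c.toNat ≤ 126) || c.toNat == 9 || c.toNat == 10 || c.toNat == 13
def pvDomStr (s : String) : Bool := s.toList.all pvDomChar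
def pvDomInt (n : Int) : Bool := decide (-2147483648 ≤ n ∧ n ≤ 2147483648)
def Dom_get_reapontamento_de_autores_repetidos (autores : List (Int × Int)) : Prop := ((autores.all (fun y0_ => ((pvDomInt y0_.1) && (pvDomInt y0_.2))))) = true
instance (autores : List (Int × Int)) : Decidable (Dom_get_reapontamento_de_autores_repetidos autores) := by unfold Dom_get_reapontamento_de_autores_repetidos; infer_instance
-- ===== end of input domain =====

-- B replaces groupby grouping + length filter + dict comprehension by a group-free
-- neighbor-flag formulation (adjacent-pair key flags + run-leader scan); alternative decomposition, same cost.

-- ===== PORT A =====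
-- groupby(autores, key = r[0]) with the inner comprehension [cod_autor for _, cod_autor in grupo]:
-- consecutive runs of equal first components, projected to the second component.
def pvRunsA : List (Int × Int) → List (List Int)
  | [] => []
  | (z, a) :: rest =>
      (a :: (rest.takeWhile (fun p => p.1 == z)).map (·.2)) ::
        pvRunsA (rest.dropWhile (fun p => p.1 == z))
termination_by l => l.length
decreasing_by
  simpa using Nat.lt_succ_of_le (List.length_dropWhile_le (fun p => p.1 == z) rest)

def get_reapontamento_de_autores_repetidos (autores : List (Int × Int)) : (List (Int × Int)) × List Int :=
  let grupos_de_repetidos := pvRunsA autores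
  let grupos_de_repetidos := grupos_de_repetidos.filter (fun g => g.length > 1)
  let reapontamento := grupos_de_repetidos.foldl
      (fun d grupo => grupo.foldl (fun d autor => d.insert autor (PySem.List.pyGetD grupo 0 0)) d)
      PySem.Dict.empty
  let apagar := (reapontamento.items.filter (fun p => !(p.1 == p.2))).map (·.1)
  (reapontamento.items, apagar)

-- ===== PORT B =====
-- loop body of the `firsts` scan: if not sp, reset prev to this author; append prev.
-- prev starts as none (Python's None) and is never appended as none: sp is False at the first element.
def pvStepFirst (st : Option Int × List Int) (x : (Int × Int) × Bool) : Option Int × List Int :=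
  let prev := if !x.2 then some x.1.2 else st.1
  (prev, st.2 ++ [prev.getD 0])

-- loop body of the dict-building loop: insert autor ↦ first when sp or sn
def pvStepD (d : PySem.Dict Int Int) (x : ((Int × Int) × Int) × (Bool × Bool)) : PySem.Dict Int Int :=
  if x.2.1 || x.2.2 then d.insert x.1.1.2 x.1.2 else d

def get_reapontamento_de_autores_repetidos_alt (autores : List (Int × Int)) : (List (Int × Int)) × List Int :=
  let pares := autores.zip (autores.drop 1)   -- zip(autores, autores[1:])
  let same_prev := if autores.isEmpty then [] else false :: pares.map (fun pq => pq.1.1 == pq.2.1)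
  let same_next := if autores.isEmpty then [] else pares.map (fun pq => pq.1.1 == pq.2.1) ++ [false]
  let firsts := ((autores.zip same_prev).foldl pvStepFirst (none, [])).2
  let reapontamento := ((autores.zip firsts).zip (same_prev.zip same_next)).foldl pvStepD PySem.Dict.empty
  let apagar := (reapontamento.items.filter (fun p => !(p.1 == p.2))).map (·.1)
  (reapontamento.items, apagar)

-- ===== PRECONDITION & SPEC =====
def Spec_get_reapontamento_de_autores_repetidos (autores : List (Int × Int)) (out : (List (Int × Int)) × List Int) : Prop := out = get_reapontamento_de_autores_repetidos_alt autores
instance (autores : List (Int × Int)) (out : (List (Int × Int)) × List Int) : Decidable (Spec_get_reapontamento_de_autores_repetidos autores out) := by unfold Spec_get_reapontamento_de_autores_repetidos; infer_instance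

-- ===== CLAIM (what is proved, stated in full; the proofs are below) =====
def Claim_equal_get_reapontamento_de_autores_repetidos : Prop := ∀ (autores : List (Int × Int)), Dom_get_reapontamento_de_autores_repetidos autores → Spec_get_reapontamento_de_autores_repetidos autores (get_reapontamento_de_autores_repetidos autores)

-- ===== LEMMAS AND PROOFS =====

-- ---- proof-only names for B's intermediate lists ----
def pvSP (l : List (Int × Int)) : List Bool :=
  if l.isEmpty then [] else false :: (l.zip (l.drop 1)).map (fun pq => pq.1.1 == pq.2.1)
def pvSN (l : List (Int × Int)) : List Bool :=
  if l.isEmpty then [] else (l.zip (l.drop 1)).map (fun pq => pq.1.1 == pq.2.1) ++ [false]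
def pvFS (l : List (Int × Int)) : List Int :=
  ((l.zip (pvSP l)).foldl pvStepFirst (none, [])).2
def pvBDict (l : List (Int × Int)) (d : PySem.Dict Int Int) : PySem.Dict Int Int :=
  ((l.zip (pvFS l)).zip ((pvSP l).zip (pvSN l))).foldl pvStepD d

theorem alt_eq (l : List (Int × Int)) :
    get_reapontamento_de_autores_repetidos_alt l =
      (((pvBDict l PySem.Dict.empty).items),
       (((pvBDict l PySem.Dict.empty).items.filter (fun p => !(p.1 == p.2))).map (·.1))) := by
  rfl

-- ---- the flush of a run into the dict (shared characterization of both sides) ----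
def pvFlush (d : PySem.Dict Int Int) (buf : List Int) : PySem.Dict Int Int :=
  if buf.length > 1 then
    buf.foldl (fun d autor => d.insert autor (PySem.List.pyGetD buf 0 0)) d
  else d

-- A's filter-then-fold equals folding pvFlush over all runs
theorem foldl_filter_flush (gs : List (List Int)) (d : PySem.Dict Int Int) :
    (gs.filter (fun g => g.length > 1)).foldl
        (fun d grupo => grupo.foldl (fun d autor => d.insert autor (PySem.List.pyGetD grupo 0 0)) d) d
      = gs.foldl pvFlush d := by
  rw [List.foldl_filter]
  congr 1
  funext d' g
  by_cases hg : g.length > 1 <;> simp [pvFlush, hg]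

-- ---- adjacent-pair list ----
def pvPairs : (Int × Int) → List (Int × Int) → List Bool
  | _, [] => []
  | x, y :: r => (x.1 == y.1) :: pvPairs y r

theorem zipmap_eq_pairs : ∀ (t : List (Int × Int)) (x : Int × Int),
    (((x :: t).zip t).map (fun pq => pq.1.1 == pq.2.1)) = pvPairs x t := by
  intro t
  induction t with
  | nil => intro x; simp [pvPairs]
  | cons y r ih => intro x; simp [pvPairs, ih y]

theorem pairs_run : ∀ (t : List (Int × Int)) (z b : Int),
    pvPairs (z, b) t =
      List.replicate (t.takeWhile (fun p => p.1 == z)).length true ++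
        (match t.dropWhile (fun p => p.1 == z) with
         | [] => []
         | w :: v' => false :: pvPairs w v') := by
  intro t
  induction t with
  | nil => intro z b; simp [pvPairs]
  | cons p t' ih =>
    intro z b
    obtain ⟨z', a'⟩ := p
    by_cases hz : z' = z
    · subst hz
      simp only [pvPairs, List.takeWhile_cons, List.dropWhile_cons]
      simp only [BEq.rfl, reduceIte, List.length_cons, List.replicate_succ]
      rw [ih z' a']
      simp
    · have hb : ((z', a').1 == z) = false := by simp [hz]
      simp only [pvPairs, List.takeWhile_cons, List.dropWhile_cons, hb]
      have hzz : (z == z') = false := by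
        simp; exact fun h => hz h.symm
      simp [hzz]

-- ---- decompositions of B's intermediate lists at the first run ----
theorem pvSP_run (z a : Int) (t : List (Int × Int)) :
    pvSP ((z, a) :: t) =
      false :: List.replicate (t.takeWhile (fun p => p.1 == z)).length true ++
        pvSP (t.dropWhile (fun p => p.1 == z)) := by
  simp only [pvSP, List.isEmpty_cons, List.drop_one, List.tail_cons]
  rw [zipmap_eq_pairs t (z, a), pairs_run t z a]
  rcases h : t.dropWhile (fun p => p.1 == z) with _ | ⟨w, v'⟩
  · rw [h]; simp
  · rw [h]; simp [zipmap_eq_pairs v' w]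

theorem pvSN_run (z a : Int) (t : List (Int × Int)) :
    pvSN ((z, a) :: t) =
      List.replicate (t.takeWhile (fun p => p.1 == z)).length true ++
        false :: pvSN (t.dropWhile (fun p => p.1 == z)) := by
  simp only [pvSN, List.isEmpty_cons, List.drop_one, List.tail_cons]
  rw [zipmap_eq_pairs t (z, a), pairs_run t z a]
  rcases h : t.dropWhile (fun p => p.1 == z) with _ | ⟨w, v'⟩
  · rw [h]; simp
  · rw [h]; simp [zipmap_eq_pairs v' w]

-- lengths
theorem foldFirst_acc : ∀ (xs : List ((Int × Int) × Bool)) (q : Option Int) (acc : List Int),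
    (xs.foldl pvStepFirst (q, acc)).1 = (xs.foldl pvStepFirst (q, [])).1 ∧
    (xs.foldl pvStepFirst (q, acc)).2 = acc ++ (xs.foldl pvStepFirst (q, [])).2 := by
  intro xs
  induction xs with
  | nil => intro q acc; simp
  | cons x r ih =>
    intro q acc
    simp only [List.foldl_cons, pvStepFirst, List.nil_append]
    obtain ⟨h1, h2⟩ := ih (if !x.2 then some x.1.2 else q) (acc ++ [(if !x.2 then some x.1.2 else q).getD 0])
    obtain ⟨h1', h2'⟩ := ih (if !x.2 then some x.1.2 else q) ([(if !x.2 then some x.1.2 else q).getD 0])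
    constructor
    · rw [h1, h1']
    · rw [h2, h2']
      simp

-- folding a run (all sp = true) only replicates the carried leader
theorem foldFirst_run : ∀ (u : List (Int × Int)) (a : Int) (acc : List Int),
    (u.zip (List.replicate u.length true)).foldl pvStepFirst (some a, acc)
      = (some a, acc ++ List.replicate u.length a) := by
  intro u
  induction u with
  | nil => intro a acc; simp
  | cons p u' ih =>
    intro a acc
    simp only [List.length_cons, List.replicate_succ, List.zip_cons_cons, List.foldl_cons,
      pvStepFirst]
    simp only [Bool.not_true, Bool.false_eq_true, reduceIte, Option.getD_some]
    rw [ih a (acc ++ [a])]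
    simp [List.replicate_succ]

-- the carry is irrelevant at a run boundary: sp is false at the head of v
theorem foldFirst_reset : ∀ (v : List (Int × Int)) (q : Option Int) (acc : List Int),
    ((v.zip (pvSP v)).foldl pvStepFirst (q, acc)).2 = acc ++ pvFS v := by
  intro v q acc
  rcases v with _ | ⟨w, v'⟩
  · simp [pvFS, pvSP]
  · have hsp : pvSP (w :: v') = false :: ((w :: v').zip (v')).map (fun pq => pq.1.1 == pq.2.1) := by
      simp [pvSP]
    rw [hsp]
    simp only [List.zip_cons_cons, List.foldl_cons, pvStepFirst, Bool.not_false, reduceIte,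
      Option.getD_some]
    unfold pvFS
    rw [hsp]
    simp only [List.zip_cons_cons, List.foldl_cons, pvStepFirst, Bool.not_false, reduceIte,
      Option.getD_some]
    obtain ⟨_, h2⟩ := foldFirst_acc ((v'.zip (((w :: v').zip v').map (fun pq => pq.1.1 == pq.2.1)))) (some w.2) (acc ++ [w.2])
    obtain ⟨_, h2'⟩ := foldFirst_acc ((v'.zip (((w :: v').zip v').map (fun pq => pq.1.1 == pq.2.1)))) (some w.2) ([w.2])
    rw [h2]
    simp only [List.nil_append]
    rw [h2']
    simp

-- fold of the firsts scan over head :: run ++ rest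
theorem foldFirst_split (x : Int × Int) (u v : List (Int × Int)) :
    (((x :: (u ++ v)).zip (false :: List.replicate u.length true ++ pvSP v)).foldl
        pvStepFirst ((none : Option Int), ([] : List Int))).2
      = x.2 :: List.replicate u.length x.2 ++ pvFS v := by
  have h1 : (x :: (u ++ v)) = (x :: u) ++ v := by simp
  have h2 : (false :: List.replicate u.length true ++ pvSP v)
      = (false :: List.replicate u.length true) ++ pvSP v := by simp
  rw [h1, h2, List.zip_append (by simp), List.zip_cons_cons]
  simp only [List.foldl_append, List.foldl_cons, pvStepFirst, Bool.not_false, reduceIte,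
    Option.getD_some, List.nil_append]
  rw [foldFirst_run]
  rw [foldFirst_reset]
  simp

theorem pvFS_run (z a : Int) (t : List (Int × Int)) :
    pvFS ((z, a) :: t) =
      a :: List.replicate (t.takeWhile (fun p => p.1 == z)).length a ++
        pvFS (t.dropWhile (fun p => p.1 == z)) := by
  have ht : t = t.takeWhile (fun p => p.1 == z) ++ t.dropWhile (fun p => p.1 == z) :=
    (List.takeWhile_append_dropWhile (p := fun p => p.1 == z) (l := t)).symm
  unfold pvFS
  rw [pvSP_run z a t]
  nth_rewrite 1 [ht]
  exact foldFirst_split (z, a) _ _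

-- dict-fold over a run body (sp = true throughout) inserts each author ↦ leader
theorem foldD_run : ∀ (u : List (Int × Int)) (sns : List Bool) (a : Int) (d : PySem.Dict Int Int),
    sns.length = u.length →
    ((u.zip (List.replicate u.length a)).zip ((List.replicate u.length true).zip sns)).foldl pvStepD d
      = u.foldl (fun d p => d.insert p.2 a) d := by
  intro u
  induction u with
  | nil => intro sns a d h; simp
  | cons p u' ih =>
    intro sns a d h
    rcases sns with _ | ⟨s, sns'⟩
    · simp at h
    · simp only [List.length_cons, List.replicate_succ, List.zip_cons_cons, List.foldl_cons,
        pvStepD, Bool.true_or, reduceIte]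
      exact ih sns' a _ (by simpa using h)

-- main lemma: B's dict fold equals folding pvFlush over A's groupby runs
-- fold of the dict loop over head :: run ++ rest, for a run of length m+2 ≥ 2
theorem foldD_split (x : Int × Int) (u v : List (Int × Int)) (a : Int) (m : Nat)
    (F : List Int) (P N : List Bool) (d : PySem.Dict Int Int)
    (hm : u.length = m + 1) :
    (((x :: (u ++ v)).zip (a :: List.replicate u.length a ++ F)).zip
        ((false :: List.replicate u.length true ++ P).zip
          (List.replicate u.length true ++ false :: N))).foldl pvStepD d
      = ((v.zip F).zip (P.zip N)).foldl pvStepD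
          (u.foldl (fun d p => d.insert p.2 a) (d.insert x.2 a)) := by
  have h1 : (x :: (u ++ v)) = (x :: u) ++ v := by simp
  have h2 : (a :: List.replicate u.length a ++ F) = (a :: List.replicate u.length a) ++ F := by simp
  have h3 : (false :: List.replicate u.length true ++ P)
      = (false :: List.replicate u.length true) ++ P := by simp
  have h4 : (List.replicate u.length true ++ false :: N)
      = (true :: (List.replicate m true ++ [false])) ++ N := by
    rw [hm]
    simp [List.replicate_succ]
  rw [h1, h2, h3, h4,
    List.zip_append (l₁ := x :: u) (by simp),
    List.zip_append (l₁ := false :: List.replicate u.length true) (by simp [hm]),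
    List.zip_cons_cons, List.zip_cons_cons,
    List.zip_append (by simp [hm]),
    List.zip_cons_cons]
  simp only [List.foldl_append, List.foldl_cons]
  have hstep : pvStepD d ((x, a), (false, true)) = d.insert x.2 a := by
    simp [pvStepD]
  rw [hstep, foldD_run u (List.replicate m true ++ [false]) a _ (by simp [hm])]

theorem pvBDict_runs : ∀ (n : Nat) (l : List (Int × Int)), l.length ≤ n →
    ∀ d, pvBDict l d = (pvRunsA l).foldl pvFlush d := by
  intro n
  induction n with
  | zero =>
    intro l hl d
    have : l = [] := List.length_eq_zero_iff.mp (Nat.le_zero.mp hl)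
    subst this
    simp [pvBDict, pvRunsA, pvFS, pvSP, pvSN]
  | succ n ih =>
    intro l hl d
    rcases l with _ | ⟨⟨z, a⟩, t⟩
    · simp [pvBDict, pvRunsA, pvFS, pvSP, pvSN]
    · have ht : t = t.takeWhile (fun p => p.1 == z) ++ t.dropWhile (fun p => p.1 == z) :=
        (List.takeWhile_append_dropWhile (p := fun p => p.1 == z) (l := t)).symm
      have hvlen : (t.dropWhile (fun p => p.1 == z)).length ≤ n := by
        have h1 : (t.dropWhile (fun p => p.1 == z)).length ≤ t.length :=
          List.length_dropWhile_le _ t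
        have h2 : t.length + 1 ≤ n + 1 := by simpa using hl
        omega
      unfold pvBDict
      rw [pvSP_run z a t, pvSN_run z a t, pvFS_run z a t, pvRunsA]
      rcases hu : t.takeWhile (fun p => p.1 == z) with _ | ⟨p0, u'⟩
      · -- run of length 1: nothing is inserted for the head
        rw [hu] at ht
        simp only [hu, List.length_nil, List.replicate_zero, List.nil_append, List.map_nil]
        nth_rewrite 1 [ht]
        simp only [List.nil_append, List.singleton_append, List.zip_cons_cons, List.foldl_cons,
          pvStepD, Bool.or_self, Bool.false_eq_true, reduceIte]
        have hpv : (((t.dropWhile (fun p => p.1 == z)).zip (pvFS (t.dropWhile (fun p => p.1 == z)))).zip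
              ((pvSP (t.dropWhile (fun p => p.1 == z))).zip (pvSN (t.dropWhile (fun p => p.1 == z))))).foldl pvStepD d
            = pvBDict (t.dropWhile (fun p => p.1 == z)) d := rfl
        rw [hpv, ih _ hvlen d]
        simp [pvFlush]
      · -- run of length ≥ 2: the whole run is inserted, pointing at a
        rw [hu] at ht
        rw [hu]
        nth_rewrite 1 [ht]
        rw [foldD_split (z, a) (p0 :: u') (t.dropWhile (fun p => p.1 == z)) a u'.length
          (pvFS (t.dropWhile (fun p => p.1 == z))) (pvSP (t.dropWhile (fun p => p.1 == z)))
          (pvSN (t.dropWhile (fun p => p.1 == z))) d (by simp)]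
        have hpv : ∀ d', (((t.dropWhile (fun p => p.1 == z)).zip (pvFS (t.dropWhile (fun p => p.1 == z)))).zip
              ((pvSP (t.dropWhile (fun p => p.1 == z))).zip (pvSN (t.dropWhile (fun p => p.1 == z))))).foldl pvStepD d'
            = pvBDict (t.dropWhile (fun p => p.1 == z)) d' := fun _ => rfl
        rw [hpv, ih _ hvlen]
        have hflush : pvFlush d (a :: (p0 :: u').map (·.2))
            = ((p0 :: u').map (·.2)).foldl (fun d x => d.insert x a) (d.insert a a) := by
          unfold pvFlush
          have hlen : (a :: (p0 :: u').map (·.2)).length > 1 := by simp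
          rw [if_pos hlen]
          simp [PySem.List.pyGetD]
        simp only [List.foldl_cons]
        congr 1
        rw [hflush, List.foldl_map, List.foldl_cons]

-- ===== VERDICT (by name: the statement is the Claim_ definition above) =====
theorem get_reapontamento_de_autores_repetidos_spec : Claim_equal_get_reapontamento_de_autores_repetidos := by
  intro autores _
  unfold Spec_get_reapontamento_de_autores_repetidos
  rw [alt_eq]
  have hB : pvBDict autores PySem.Dict.empty = (pvRunsA autores).foldl pvFlush PySem.Dict.empty :=
    pvBDict_runs autores.length autores le_rfl _
  simp only [get_reapontamento_de_autores_repetidos]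
  rw [foldl_filter_flush, ← hB]
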